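-- pv_equiv track=rewrite | github.com/zaivsNoob/Ums_Data_Collection | modbus_TCP/modbus_client_ZLAN.py | generate_slave_config
-- ===== SOURCE A (Python) =====
-- def generate_slave_config(slave):
--                 total_meters = slave['number_of_meters']  # Total number of meters for this slave
--                 meters_per_config = 3  # Number of meters per configuration block
--
--                 slave_data_fetch_config = []
--                 full_blocks = total_meters // meters_per_config  # Number of full blocks with 3 meters
--                 remaining_meters = total_meters % meters_per_config  # Remaining meters after full blocks
--
--                 for i in range(full_blocks):
--                     slave_data_fetch_config.append({
--                         "start_reg": i * 120,
--                         "count": 120,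
--                         "meter_fetched": meters_per_config
--                     })
--
--                 if remaining_meters > 0:
--                     slave_data_fetch_config.append({
--                         "start_reg": full_blocks * 120,
--                         "count": remaining_meters * 40,
--                         "meter_fetched": remaining_meters
--                     })
--
--                 # slave_config_storage = [
--                 #     {
--                 #         "start_reg": 600 + i * 120,
--                 #         "count": 120,
--                 #         "meter_fetched": 1
--                 #     } for i in range(total_meters)
--                 # ]
--
--                 return slave_data_fetch_config
-- ===== SOURCE B (Python) =====
-- def generate_slave_config(slave):
--     def blocks(remaining, block):
--         if remaining <= 0:
--             return []
--         m = min(3, remaining)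
--         return [{
--             "start_reg": block * 120,
--             "count": m * 40,
--             "meter_fetched": m
--         }] + blocks(remaining - 3, block + 1)
--     return blocks(slave['number_of_meters'], 0)
-- ===== Notes on version B (the rewrite author's own statement) =====
-- stated objective: alternative
-- what changed: Replaces A's iterative full-blocks loop plus trailing remainder branch by a recursive decomposition that consumes the remaining meter count three at a time, emitting each block (full or partial) from the same recursive case and stopping when no meters remain.
-- intended difference: On slaves whose 'number_of_meters' is negative and not divisible by 3, A returns a spurious trailing block with a negative start_reg and Python's positive remainder as the meter count; B returns the empty configuration, the intended result for a non-positive meter count. — e.g. on generate_slave_config([("number_of_meters", -1)]): A returns [[("start_reg", -120), ("count", 80), ("meter_fetched", 2)]], B returns []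
-- outside the precondition, e.g. on generate_slave_config({}): A raises KeyError, B raises KeyError
import Mathlib
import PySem

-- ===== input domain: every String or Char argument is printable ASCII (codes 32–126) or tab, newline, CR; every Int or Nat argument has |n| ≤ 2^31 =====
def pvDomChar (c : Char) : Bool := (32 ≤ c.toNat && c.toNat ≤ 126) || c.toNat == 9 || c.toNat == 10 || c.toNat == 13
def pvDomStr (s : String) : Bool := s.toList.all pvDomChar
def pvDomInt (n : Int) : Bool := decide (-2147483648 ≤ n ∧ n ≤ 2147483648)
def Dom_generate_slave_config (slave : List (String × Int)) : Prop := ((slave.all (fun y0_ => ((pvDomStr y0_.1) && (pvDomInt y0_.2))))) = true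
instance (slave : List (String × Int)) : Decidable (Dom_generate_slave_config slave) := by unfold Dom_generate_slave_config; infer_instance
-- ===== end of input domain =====

-- B replaces A's full-blocks loop plus trailing remainder branch by a recursive decomposition
-- consuming the remaining meter count three at a time; B returns [] for negative meter counts
-- where A emits a spurious remainder block (see D_ below).


-- ===== PORT A =====
-- slave['number_of_meters']: first-match association-list lookup; KeyError (none) excluded by Pre_.
def generate_slave_config (slave : List (String × Int)) : List (List (String × Int)) :=
  match slave.lookup "number_of_meters" with
  | none => []   -- KeyError in Python; outside Pre_
  | some total_meters =>
    let meters_per_config : Int := 3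
    let full_blocks := PySem.Int.floordiv total_meters meters_per_config
    let remaining_meters := PySem.Int.mod total_meters meters_per_config
    let cfg := (PySem.List.pyRange 0 full_blocks 1).foldl
      (fun acc i => acc ++ [[("start_reg", i * 120), ("count", (120 : Int)),
                             ("meter_fetched", meters_per_config)]]) []
    if remaining_meters > 0 then
      cfg ++ [[("start_reg", full_blocks * 120), ("count", remaining_meters * 40),
               ("meter_fetched", remaining_meters)]]
    else cfg

-- ===== PORT B =====
-- the inner recursive helper 'blocks' of Source B, step for step; the Nat fuel only makes the
-- recursion total (it is large enough never to run out on the call below)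
def gscBlocksF : Nat -> Int -> Int -> List (List (String × Int))
  | 0, _, _ => []
  | fuel + 1, remaining, block =>
    if remaining ≤ 0 then []
    else
      let m : Int := min 3 remaining
      [("start_reg", block * 120), ("count", m * 40), ("meter_fetched", m)]
        :: gscBlocksF fuel (remaining - 3) (block + 1)

def generate_slave_config_alt (slave : List (String × Int)) : List (List (String × Int)) :=
  match slave.lookup "number_of_meters" with
  | none => []   -- KeyError in Python; outside Pre_
  | some total_meters => gscBlocksF total_meters.toNat total_meters 0

-- ===== PRECONDITION & SPEC =====
-- Pre_ excludes only slaves without a 'number_of_meters' key, on which A raises KeyError.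
def Pre_generate_slave_config (slave : List (String × Int)) : Prop :=
  (slave.lookup "number_of_meters").isSome = true
instance (slave : List (String × Int)) : Decidable (Pre_generate_slave_config slave) := by
  unfold Pre_generate_slave_config; infer_instance
def pvWitness_generate_slave_config : (List (String × Int)) := [("number_of_meters", 7)]

-- On slaves whose 'number_of_meters' is negative and not divisible by 3, A returns a spurious
-- trailing block with a negative start_reg and Python's positive remainder; B returns [], the
-- intended empty configuration for a non-positive meter count.
def D_generate_slave_config (slave : List (String × Int)) : Prop :=
  ((slave.lookup "number_of_meters").elim false
    (fun t => decide (t < 0) && !decide ((3:Int) ∣ t))) = true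
instance (slave : List (String × Int)) : Decidable (D_generate_slave_config slave) := by
  unfold D_generate_slave_config; infer_instance

def Spec_generate_slave_config (slave : List (String × Int)) (out : List (List (String × Int))) : Prop :=
  ¬ D_generate_slave_config slave → out = generate_slave_config_alt slave
instance (slave : List (String × Int)) (out : List (List (String × Int))) : Decidable (Spec_generate_slave_config slave out) := by
  unfold Spec_generate_slave_config; infer_instance

def pvDiffWitness_generate_slave_config : (List (String × Int)) := [("number_of_meters", -1)]
def pvDiffWitnessOut_generate_slave_config : (List (List (String × Int))) × (List (List (String × Int))) :=
  ([[("start_reg", -120), ("count", 80), ("meter_fetched", 2)]], [])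

-- ===== CLAIM (what is proved, stated in full; the proofs are below) =====
def Claim_unchanged_generate_slave_config : Prop := ∀ (slave : List (String × Int)), Dom_generate_slave_config slave → Pre_generate_slave_config slave → Spec_generate_slave_config slave (generate_slave_config slave)
def Claim_changed_generate_slave_config : Prop := Dom_generate_slave_config (pvDiffWitness_generate_slave_config) ∧ Pre_generate_slave_config (pvDiffWitness_generate_slave_config) ∧ D_generate_slave_config (pvDiffWitness_generate_slave_config) ∧ generate_slave_config (pvDiffWitness_generate_slave_config) = pvDiffWitnessOut_generate_slave_config.1 ∧ generate_slave_config_alt (pvDiffWitness_generate_slave_config) = pvDiffWitnessOut_generate_slave_config.2 ∧ pvDiffWitnessOut_generate_slave_config.1 ≠ pvDiffWitnessOut_generate_slave_config.2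
def Claim_exact_generate_slave_config : Prop := ∀ (slave : List (String × Int)), Dom_generate_slave_config slave → Pre_generate_slave_config slave → D_generate_slave_config slave → generate_slave_config slave ≠ generate_slave_config_alt slave

-- ===== LEMMAS AND PROOFS =====

-- A's body for total = n ≥ 0, as a map over block indices
theorem pv_A_body (n : Nat) :
    generate_slave_config [("number_of_meters", (n : Int))]
      = ((List.range (n / 3)).map
          (fun (k : Nat) => [("start_reg", (k : Int) * 120), ("count", (120 : Int)),
                     ("meter_fetched", (3 : Int))]))
        ++ (if n % 3 > 0 then
              [[("start_reg", ((n / 3 : Nat) : Int) * 120),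
                ("count", ((n % 3 : Nat) : Int) * 40),
                ("meter_fetched", ((n % 3 : Nat) : Int))]]
            else []) := by
  have hfd : PySem.Int.floordiv (n : Int) 3 = ((n / 3 : Nat) : Int) := by
    exact_mod_cast PySem.Int.floordiv_natCast n 3
  have hmd : PySem.Int.mod (n : Int) 3 = ((n % 3 : Nat) : Int) := by
    exact_mod_cast PySem.Int.mod_natCast n 3
  simp only [generate_slave_config, List.lookup]
  simp only [BEq.rfl]
  rw [hfd, hmd, PySem.List.pyRange_one,
      PySem.List.foldl_append_singleton_eq_map, List.nil_append, List.map_map]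
  have hN : (((n / 3 : Nat) : Int) - 0).toNat = n / 3 := by omega
  rw [hN]
  have hmap : List.map
      ((fun i => [("start_reg", i * 120), ("count", (120:Int)), ("meter_fetched", (3:Int))]) ∘ (fun k : Nat => (0:Int) + (k:Int)))
      (List.range (n / 3))
      = (List.range (n / 3)).map
          (fun (k : Nat) => [("start_reg", (k : Int) * 120), ("count", (120 : Int)), ("meter_fetched", (3 : Int))]) := by
    apply List.map_congr_left
    intro k _
    simp
  by_cases h : n % 3 > 0
  · rw [if_pos (by exact_mod_cast h), if_pos h, hmap]
  · rw [if_neg (by exact_mod_cast h), if_neg h, hmap]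
    simp

-- gscBlocksF returns [] on any nonpositive remaining, whatever the fuel
theorem gscBlocksF_nonpos (fuel : Nat) (r b : Int) (h : r ≤ 0) :
    gscBlocksF fuel r b = [] := by
  cases fuel with
  | zero => rfl
  | succ f => simp [gscBlocksF, h]

-- B's recursion for total = n ≥ 0 and any starting block, as a map over block indices
theorem pv_B_body (n : Nat) : ∀ (fuel : Nat) (b : Int), n ≤ fuel →
    gscBlocksF fuel (n : Int) b
      = (List.range ((n + 2) / 3)).map
          (fun (k : Nat) => let m : Int := min 3 ((n : Int) - 3 * (k : Int))
            [("start_reg", (b + (k : Int)) * 120), ("count", m * 40), ("meter_fetched", m)]) := by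
  induction n using Nat.strong_induction_on with
  | _ n ih =>
    intro fuel b hf
    by_cases h0 : n = 0
    · subst h0
      rw [gscBlocksF_nonpos fuel ((0 : Nat) : Int) b (by norm_num)]
      norm_num
    · obtain ⟨f, rfl⟩ : ∃ f, fuel = f + 1 := ⟨fuel - 1, by omega⟩
      rw [gscBlocksF, if_neg (by omega : ¬ ((n : Int) ≤ 0))]
      by_cases h3 : n ≤ 3
      · rw [gscBlocksF_nonpos f ((n : Int) - 3) (b + 1) (by omega)]
        have hM : (n + 2) / 3 = 1 := by omega
        rw [hM]
        simp only [List.range_one, List.map_cons, List.map_nil]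
        norm_num
      · have hn3 : ((n : Int) - 3) = ((n - 3 : Nat) : Int) := by omega
        rw [hn3, ih (n - 3) (by omega) f (b + 1) (by omega)]
        have hM : (n + 2) / 3 = (n - 3 + 2) / 3 + 1 := by omega
        rw [hM, List.range_succ_eq_map, List.map_cons, List.map_map]
        have htail : List.map
            (fun (k : Nat) => let m : Int := min 3 (((n - 3 : Nat) : Int) - 3 * (k : Int))
              [("start_reg", (b + 1 + (k : Int)) * 120), ("count", m * 40), ("meter_fetched", m)])
            (List.range ((n - 3 + 2) / 3))
            = List.map
            ((fun (k : Nat) => let m : Int := min 3 ((n : Int) - 3 * (k : Int))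
              [("start_reg", (b + (k : Int)) * 120), ("count", m * 40), ("meter_fetched", m)])
              ∘ Nat.succ)
            (List.range ((n - 3 + 2) / 3)) := by
          apply List.map_congr_left
          intro k _
          simp only [Function.comp, Nat.succ_eq_add_one]
          have h1 : b + 1 + (k : Int) = b + ((k + 1 : Nat) : Int) := by push_cast; ring
          have h2 : ((n - 3 : Nat) : Int) - 3 * (k : Int) = (n : Int) - 3 * ((k + 1 : Nat) : Int) := by
            push_cast; omega
          rw [h1, h2]
        rw [htail]
        norm_num

-- A = B for every nonnegative meter count
theorem pv_agree_nonneg (n : Nat) :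
    generate_slave_config [("number_of_meters", (n : Int))]
      = generate_slave_config_alt [("number_of_meters", (n : Int))] := by
  have hB : generate_slave_config_alt [("number_of_meters", (n : Int))]
      = gscBlocksF ((n : Int)).toNat (n : Int) 0 := by
    simp only [generate_slave_config_alt, List.lookup, BEq.rfl]
  rw [pv_A_body, hB, pv_B_body n ((n : Int)).toNat 0 (by omega)]
  have hz : ∀ (k : Nat), ((0 : Int) + (k : Int)) = (k : Int) := by intro k; ring
  by_cases hr : n % 3 > 0
  · have hM : (n + 2) / 3 = n / 3 + 1 := by omega
    rw [hM, if_pos hr, List.range_succ, List.map_append]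
    congr 1
    · apply List.map_congr_left
      intro k hk
      have hk3 : 3 * k + 3 ≤ n := by
        have := List.mem_range.mp hk; omega
      have hm : min (3 : Int) ((n : Int) - 3 * k) = 3 := by
        have : (3 : Int) ≤ (n : Int) - 3 * (k:Nat) := by omega
        omega
      simp only [hm, hz]; norm_num
    · have hm : min (3 : Int) ((n : Int) - 3 * (n / 3 : Nat)) = ((n % 3 : Nat) : Int) := by
        have h1 : (n : Int) - 3 * (n / 3 : Nat) = ((n % 3 : Nat) : Int) := by
          push_cast; omega
        rw [h1]; omega
      simp only [List.map_cons, List.map_nil, hm, hz]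
  · have hr0 : n % 3 = 0 := by omega
    have hM : (n + 2) / 3 = n / 3 := by omega
    rw [hM, if_neg hr, List.append_nil]
    apply List.map_congr_left
    intro k hk
    have hk3 : 3 * k + 3 ≤ n := by
      have := List.mem_range.mp hk; omega
    have hm : min (3 : Int) ((n : Int) - 3 * k) = 3 := by
      have : (3 : Int) ≤ (n : Int) - 3 * (k:Nat) := by omega
      omega
    simp only [hm, hz]; norm_num

-- both ports see only the first binding of the key
theorem pv_reduce (slave : List (String × Int)) (t : Int)
    (h : slave.lookup "number_of_meters" = some t) :
    generate_slave_config slave = generate_slave_config [("number_of_meters", t)]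
    ∧ generate_slave_config_alt slave = generate_slave_config_alt [("number_of_meters", t)] := by
  constructor
  · simp only [generate_slave_config, h, List.lookup, BEq.rfl]
  · simp only [generate_slave_config_alt, h, List.lookup, BEq.rfl]

-- A = B when 3 ∣ total, total < 0 (both return [])
theorem pv_agree_neg_dvd (t : Int) (ht : t < 0) (hd : (3:Int) ∣ t) :
    generate_slave_config [("number_of_meters", t)]
      = generate_slave_config_alt [("number_of_meters", t)] := by
  have hmod : PySem.Int.mod t 3 = 0 := (PySem.Int.mod_eq_zero_iff_dvd t 3).mpr hd
  have hfb : PySem.Int.floordiv t 3 < 0 := by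
    have := PySem.Int.floordiv_mul_add_mod t 3
    rw [hmod] at this; omega
  simp only [generate_slave_config, generate_slave_config_alt, List.lookup,
    BEq.rfl, hmod]
  rw [PySem.List.pyRange_one, gscBlocksF_nonpos t.toNat t 0 (by omega)]
  have : ((PySem.Int.floordiv t 3) - 0).toNat = 0 := by omega
  rw [this]
  simp

-- ===== VERDICT (by name: the statement is the Claim_ definition above) =====
theorem generate_slave_config_spec : Claim_unchanged_generate_slave_config := by
  intro slave _ hpre hnd
  unfold Pre_generate_slave_config at hpre
  obtain ⟨t, ht⟩ := Option.isSome_iff_exists.mp hpre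
  obtain ⟨hA, hB⟩ := pv_reduce slave t ht
  rw [hA, hB]
  unfold D_generate_slave_config at hnd
  rw [ht] at hnd
  by_cases hneg : t < 0
  · have hd3 : (3 : Int) ∣ t := by
      by_contra hc
      exact hnd (by simp [hneg, hc])
    exact pv_agree_neg_dvd t hneg hd3
  · obtain ⟨n, rfl⟩ := Int.eq_ofNat_of_zero_le (by omega : 0 ≤ t)
    exact pv_agree_nonneg n

theorem generate_slave_config_changed : Claim_changed_generate_slave_config := by
  unfold Claim_changed_generate_slave_config; decide

theorem generate_slave_config_tight : Claim_exact_generate_slave_config := by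
  intro slave _ hpre hd
  unfold Pre_generate_slave_config at hpre
  obtain ⟨t, ht⟩ := Option.isSome_iff_exists.mp hpre
  obtain ⟨hA, hB⟩ := pv_reduce slave t ht
  rw [hA, hB]
  unfold D_generate_slave_config at hd
  rw [ht] at hd
  simp only [Option.elim, Bool.and_eq_true, Bool.not_eq_true', decide_eq_true_eq,
    decide_eq_false_iff_not] at hd
  obtain ⟨hneg, hndvd⟩ := hd
  have hmodpos : 0 < PySem.Int.mod t 3 := by
    have h0 := PySem.Int.mod_nonneg t (by norm_num : (0:Int) < 3)
    rcases lt_or_eq_of_le h0 with h | h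
    · exact h
    · exact absurd ((PySem.Int.mod_eq_zero_iff_dvd t 3).mp h.symm) hndvd
  have hBempty : generate_slave_config_alt [("number_of_meters", t)] = [] := by
    simp only [generate_slave_config_alt, List.lookup, BEq.rfl]
    rw [gscBlocksF_nonpos t.toNat t 0 (by omega)]
  rw [hBempty]
  simp only [generate_slave_config, List.lookup, BEq.rfl]
  rw [if_pos hmodpos]
  simp
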